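-- pv_equiv track=rewrite | github.com/OlaProeis/Glitchframe | pipeline/lyrics_aligner.py | _tokens_are_fuzzy_equal
-- ===== SOURCE A (Python) =====
-- def _tokens_are_fuzzy_equal(a: str, b: str) -> bool:
--     """Return True when two *already-normalised* tokens should count as a match.
--
--     The strict ``a == b`` test is too conservative on sung / chopped vocals:
--     whisper hears "were" for "we're", "yo" for "you", "till" for "til",
--     "thru" for "through", etc. A single-edit Levenshtein distance covers
--     the vast majority of these near-misses while still rejecting unrelated
--     words. We also treat prefixes (either direction) of length ≥ 3 as a
--     match, so "yo"↔"you" / "comin"↔"coming" work.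
--
--     Both arguments MUST already be run through :func:`_normalise_token`;
--     this function does not strip punctuation / case for you.
--     """
--     if not a or not b:
--         return False
--     if a == b:
--         return True
--     la, lb = len(a), len(b)
--     # Short tokens are riskier; require an exact match for anything < 3 chars.
--     if la < 3 or lb < 3:
--         return False
--     # Mutual prefix of length ≥ 3: covers contractions / chopped endings.
--     if la >= 3 and lb >= 3:
--         short, long = (a, b) if la <= lb else (b, a)
--         if long.startswith(short):
--             return True
--     # Fall back to Levenshtein-1 for same-length typos and insert/delete-1
--     # cases that didn't clear the prefix test.
--     if abs(la - lb) > 1: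
--         return False
--     # Distance-1 DP bounded to 1 (early-out as soon as we exceed).
--     if la == lb:
--         diffs = 0
--         for ca, cb in zip(a, b):
--             if ca != cb:
--                 diffs += 1
--                 if diffs > 1:
--                     return False
--         return diffs <= 1
--     # Insert / delete of one char: longer word minus one char must equal shorter.
--     short, long = (a, b) if la < lb else (b, a)
--     i = j = mismatches = 0
--     while i < len(short) and j < len(long):
--         if short[i] == long[j]:
--             i += 1
--             j += 1
--             continue
--         mismatches += 1
--         if mismatches > 1:
--             return False
--         j += 1
--     return True
-- ===== SOURCE B (Python) =====
-- def _tokens_are_fuzzy_equal(a: str, b: str) -> bool: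
--     """Same decision as A: guards + mutual-prefix test, then a first-divergence
--     slice comparison instead of A's two counting loops."""
--     if not a or not b:
--         return False
--     if a == b:
--         return True
--     la, lb = len(a), len(b)
--     if la < 3 or lb < 3:
--         return False
--     short, long = (a, b) if la <= lb else (b, a)
--     if long.startswith(short):
--         return True
--     if lb - la not in (-1, 0, 1):
--         return False
--     # Locate the first index where the two words diverge, then a single
--     # slice comparison decides "edit distance <= 1".
--     k = 0
--     while k < len(short) and short[k] == long[k]:
--         k += 1
--     if la == lb:
--         return a[k + 1:] == b[k + 1:]
--     return short[k:] == long[k + 1:]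
-- ===== Notes on version B (the rewrite author's own statement) =====
-- stated objective: alternative
-- what changed: A's two specialized Levenshtein-1 branches (a diff counter over zip for equal lengths, a two-pointer skip loop for lengths differing by one) are replaced by one first-divergence scan followed by a single slice comparison.
import Mathlib
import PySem

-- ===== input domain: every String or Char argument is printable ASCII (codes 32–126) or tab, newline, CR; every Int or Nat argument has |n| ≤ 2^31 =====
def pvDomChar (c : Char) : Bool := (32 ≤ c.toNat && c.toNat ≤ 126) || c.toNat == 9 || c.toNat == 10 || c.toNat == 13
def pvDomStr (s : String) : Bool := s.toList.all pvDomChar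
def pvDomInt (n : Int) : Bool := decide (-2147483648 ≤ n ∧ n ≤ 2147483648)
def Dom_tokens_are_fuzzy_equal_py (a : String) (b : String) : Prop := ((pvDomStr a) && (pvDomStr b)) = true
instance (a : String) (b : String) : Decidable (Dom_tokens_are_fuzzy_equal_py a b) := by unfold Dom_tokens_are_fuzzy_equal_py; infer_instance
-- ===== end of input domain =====

-- B replaces A's two counting loops by a first-divergence scan plus one slice comparison (objective: alternative, same cost).

-- ===== PORT A =====
-- equal-length branch: diffs counter over zip(a, b), early-out when diffs > 1
def pvEqLoop : List (Char × Char) → Nat → Bool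
  | [], diffs => diffs ≤ 1
  | (ca, cb) :: rest, diffs =>
      if ca ≠ cb then
        if diffs + 1 > 1 then false else pvEqLoop rest (diffs + 1)
      else pvEqLoop rest diffs

-- insert/delete branch: two-pointer while loop over short/long
def pvIdLoop : List Char → List Char → Nat → Bool
  | cs :: s', cl :: l', m =>
      if cs = cl then pvIdLoop s' l' m
      else if m + 1 > 1 then false else pvIdLoop (cs :: s') l' (m + 1)
  | _, _, _ => true

def tokens_are_fuzzy_equal_py (a : String) (b : String) : Bool :=
  let A := a.toList
  let B := b.toList
  if A = [] ∨ B = [] then false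
  else if A = B then true
  else
    let la := A.length
    let lb := B.length
    if la < 3 ∨ lb < 3 then false
    else if 3 ≤ la ∧ 3 ≤ lb ∧ (if la ≤ lb then (A, B) else (B, A)).1.isPrefixOf (if la ≤ lb then (A, B) else (B, A)).2 then true
    else if ((la : Int) - lb).natAbs > 1 then false
    else if la = lb then pvEqLoop (A.zip B) 0
    else pvIdLoop (if la < lb then (A, B) else (B, A)).1 (if la < lb then (A, B) else (B, A)).2 0

-- ===== PORT B =====
-- index of the first position where the two words diverge (k in Source B's while loop)
def pvFirstDiff : List Char → List Char → Nat
  | cs :: s', cl :: l' => if cs = cl then pvFirstDiff s' l' + 1 else 0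
  | _, _ => 0

def tokens_are_fuzzy_equal_py_alt (a : String) (b : String) : Bool :=
  let A := a.toList
  let B := b.toList
  if A = [] ∨ B = [] then false
  else if A = B then true
  else
    let la := A.length
    let lb := B.length
    if la < 3 ∨ lb < 3 then false
    else
      let s := (if la ≤ lb then (A, B) else (B, A)).1
      let l := (if la ≤ lb then (A, B) else (B, A)).2
      if s.isPrefixOf l then true
      else if ¬ ((lb : Int) - la = -1 ∨ (lb : Int) - la = 0 ∨ (lb : Int) - la = 1) then false
      else
        let k := pvFirstDiff s l
        if la = lb then decide (A.drop (k + 1) = B.drop (k + 1))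
        else decide (s.drop k = l.drop (k + 1))

-- ===== PRECONDITION & SPEC =====
def Spec_tokens_are_fuzzy_equal_py (a : String) (b : String) (out : Bool) : Prop := out = tokens_are_fuzzy_equal_py_alt a b
instance (a : String) (b : String) (out : Bool) : Decidable (Spec_tokens_are_fuzzy_equal_py a b out) := by unfold Spec_tokens_are_fuzzy_equal_py; infer_instance

-- ===== CLAIM (what is proved, stated in full; the proofs are below) =====
def Claim_equal_tokens_are_fuzzy_equal_py : Prop := ∀ (a : String) (b : String), Dom_tokens_are_fuzzy_equal_py a b → Spec_tokens_are_fuzzy_equal_py a b (tokens_are_fuzzy_equal_py a b)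

-- ===== LEMMAS AND PROOFS =====

-- after one diff has been spent, A's equal-length loop is plain list equality
theorem pvEqLoop_one (s t : List Char) (h : s.length = t.length) :
    pvEqLoop (s.zip t) 1 = decide (s = t) := by
  induction s generalizing t with
  | nil => cases t with
    | nil => simp [pvEqLoop]
    | cons c t' => simp at h
  | cons c s' ih => cases t with
    | nil => simp at h
    | cons d t' =>
      simp only [List.zip_cons_cons, pvEqLoop]
      by_cases hc : c = d
      · subst hc; simpa using ih t' (by simpa using h)
      · simp [hc]

theorem pvEqLoop_eq (s t : List Char) (h : s.length = t.length) :
    pvEqLoop (s.zip t) 0 =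
      decide (s.drop (pvFirstDiff s t + 1) = t.drop (pvFirstDiff s t + 1)) := by
  induction s generalizing t with
  | nil => cases t with
    | nil => simp [pvEqLoop, pvFirstDiff]
    | cons c t' => simp at h
  | cons c s' ih => cases t with
    | nil => simp at h
    | cons d t' =>
      simp only [List.zip_cons_cons, pvEqLoop, pvFirstDiff]
      by_cases hc : c = d
      · subst hc
        simpa using ih t' (by simpa using h)
      · simp only [hc, if_neg, ite_true, ne_eq, not_false_eq_true]
        simpa [hc] using pvEqLoop_one s' t' (by simpa using h)

-- after one skip has been spent, A's two-pointer loop is plain list equality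
theorem pvIdLoop_one (s t : List Char) (h : s.length = t.length) :
    pvIdLoop s t 1 = decide (s = t) := by
  induction s generalizing t with
  | nil => cases t with
    | nil => simp [pvIdLoop]
    | cons c t' => simp at h
  | cons c s' ih => cases t with
    | nil => simp at h
    | cons d t' =>
      simp only [pvIdLoop]
      by_cases hc : c = d
      · subst hc; simpa using ih t' (by simpa using h)
      · simp [hc]

theorem pvIdLoop_eq (s l : List Char) (h : s.length + 1 = l.length) :
    pvIdLoop s l 0 =
      decide (s.drop (pvFirstDiff s l) = l.drop (pvFirstDiff s l + 1)) := by
  induction s generalizing l with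
  | nil => cases l with
    | nil => simp at h
    | cons c l' =>
      cases l' with
      | nil => simp [pvIdLoop, pvFirstDiff]
      | cons d l'' => simp at h
  | cons c s' ih => cases l with
    | nil => simp at h
    | cons d l' =>
      simp only [pvIdLoop, pvFirstDiff]
      by_cases hc : c = d
      · subst hc; simpa using ih l' (by simpa using h)
      · simp only [hc, ite_false]
        simpa [hc] using pvIdLoop_one (c :: s') l' (by simpa using h)

-- ===== VERDICT (by name: the statement is the Claim_ definition above) =====
theorem tokens_are_fuzzy_equal_py_spec : Claim_equal_tokens_are_fuzzy_equal_py := by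
  intro a b _
  unfold Spec_tokens_are_fuzzy_equal_py tokens_are_fuzzy_equal_py tokens_are_fuzzy_equal_py_alt
  set A := a.toList with hA
  set B := b.toList with hB
  by_cases h0 : A = [] ∨ B = []
  · simp [h0]
  · simp only [h0, if_false]
    by_cases heq : A = B
    · simp [heq]
    · simp only [heq, if_false]
      by_cases hlen : A.length < 3 ∨ B.length < 3
      · simp [hlen]
      · rw [not_or, not_lt, not_lt] at hlen; obtain hlen := hlen
        simp only [if_neg (by omega : ¬ (A.length < 3 ∨ B.length < 3))]
        by_cases hle : A.length ≤ B.length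
        · simp only [hle, if_true]
          by_cases hpre : List.isPrefixOf A B
          · simp [hpre, hlen.1, hlen.2]
          · simp only [hpre, Bool.false_eq_true, and_false, if_false]
            by_cases habs : ((A.length : Int) - B.length).natAbs > 1
            · rw [if_pos habs, if_pos (by omega)]
            · rw [if_neg habs, if_neg (by omega : ¬ ¬ ((B.length : Int) - A.length = -1 ∨ (B.length : Int) - A.length = 0 ∨ (B.length : Int) - A.length = 1))]
              by_cases hq : A.length = B.length
              · rw [if_pos hq, if_pos hq]
                exact pvEqLoop_eq A B hq
              · have hlt : A.length < B.length := by omega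
                rw [if_neg hq, if_neg hq, if_pos hlt]
                have hd : A.length + 1 = B.length := by omega
                simpa [hle] using pvIdLoop_eq A B hd
        · -- B is strictly shorter
          simp only [hle, if_false]
          by_cases hpre : List.isPrefixOf B A
          · simp [hpre, hlen.1, hlen.2]
          · simp only [hpre, Bool.false_eq_true, and_false, if_false]
            by_cases habs : ((A.length : Int) - B.length).natAbs > 1
            · rw [if_pos habs, if_pos (by omega)]
            · rw [if_neg habs, if_neg (by omega : ¬ ¬ ((B.length : Int) - A.length = -1 ∨ (B.length : Int) - A.length = 0 ∨ (B.length : Int) - A.length = 1))]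
              have hq : ¬ A.length = B.length := by omega
              have hlt : ¬ A.length < B.length := by omega
              rw [if_neg hq, if_neg hq, if_neg hlt]
              have hd : B.length + 1 = A.length := by omega
              simpa [hle] using pvIdLoop_eq B A hd
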